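-- pv_equiv track=rewrite | github.com/joseandro/liToCNF | main.py | getNumOfVars
-- ===== SOURCE A (Python) =====
-- def getNumOfVars(iq):
--     vars = []
--
--     # List flattening
--     for i, valI in enumerate(iq):
--         for j, valJ in enumerate(valI):
--             if (valJ < 0):
--                 valJ *= -1
--             vars.append(valJ)
--
--     # Remove all duplicates from vars and return len
--     return len(list(set(vars)))
-- ===== SOURCE B (Python) =====
-- def getNumOfVars(iq):
--     xs = sorted(abs(v) for row in iq for v in row)
--     if not xs:
--         return 0
--     count = 1
--     for i in range(1, len(xs)):
--         if xs[i] != xs[i - 1]: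
--             count += 1
--     return count
-- ===== Notes on version B (the rewrite author's own statement) =====
-- stated objective: alternative
-- what changed: Replaces the append-then-hash-set distinct count with a flatten, sort, and single adjacent-difference scan counting runs.
import Mathlib
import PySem

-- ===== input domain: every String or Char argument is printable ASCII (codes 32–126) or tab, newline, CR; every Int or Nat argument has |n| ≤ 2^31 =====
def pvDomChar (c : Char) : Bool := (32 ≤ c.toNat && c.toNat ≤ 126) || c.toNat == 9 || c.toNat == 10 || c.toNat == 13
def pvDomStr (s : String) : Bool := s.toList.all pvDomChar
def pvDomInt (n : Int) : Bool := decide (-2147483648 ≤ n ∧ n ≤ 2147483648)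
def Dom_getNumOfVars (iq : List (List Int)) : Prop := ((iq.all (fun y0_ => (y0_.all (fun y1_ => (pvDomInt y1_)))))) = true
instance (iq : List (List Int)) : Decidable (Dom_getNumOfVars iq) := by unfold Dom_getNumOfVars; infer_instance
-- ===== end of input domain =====

-- B changes the algorithm (sort then adjacent-difference scan instead of a hash-set distinct count); same cost class, no speed claim.

-- ===== PORT A =====
def getNumOfVars (iq : List (List Int)) : Int :=
  let vars : List Int :=
    iq.foldl (fun acc valI =>
      valI.foldl (fun acc2 valJ =>
        acc2 ++ [if valJ < 0 then valJ * (-1) else valJ]) acc) []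
  ((PySem.Set.ofList vars).length : Int)

-- ===== PORT B =====
-- the scan loop: prev is the previous element, counts positions differing from it
def pvCountChanges (prev : Int) : List Int → Int
  | [] => 0
  | y :: t => (if y ≠ prev then 1 else 0) + pvCountChanges y t

def getNumOfVars_alt (iq : List (List Int)) : Int :=
  let xs := PySem.List.sorted (iq.flatMap (fun row => row.map (fun v => |v|))) (fun x => x) false
  match xs with
  | [] => 0
  | x :: t => 1 + pvCountChanges x t

-- ===== PRECONDITION & SPEC =====
def Spec_getNumOfVars (iq : List (List Int)) (out : Int) : Prop := out = getNumOfVars_alt iq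
instance (iq : List (List Int)) (out : Int) : Decidable (Spec_getNumOfVars iq out) := by unfold Spec_getNumOfVars; infer_instance

-- ===== CLAIM (what is proved, stated in full; the proofs are below) =====
def Claim_equal_getNumOfVars : Prop := ∀ (iq : List (List Int)), Dom_getNumOfVars iq → Spec_getNumOfVars iq (getNumOfVars iq)

-- ===== LEMMAS AND PROOFS =====

-- A's accumulation builds exactly the flattened list of absolute values
lemma pv_inner (row : List Int) (acc : List Int) :
    row.foldl (fun a v => a ++ [if v < 0 then v * (-1) else v]) acc
      = acc ++ row.map (fun v => |v|) := by
  induction row generalizing acc with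
  | nil => simp
  | cons v t ih =>
      rw [List.foldl_cons, ih]
      have h : (if v < 0 then v * (-1) else v) = |v| := by
        split_ifs with h
        · rw [abs_of_neg h]; ring
        · exact (abs_of_nonneg (by omega)).symm
      rw [h, List.map_cons]
      simp

lemma pv_outer (iq : List (List Int)) (acc : List Int) :
    iq.foldl (fun acc valI =>
        valI.foldl (fun a v => a ++ [if v < 0 then v * (-1) else v]) acc) acc
      = acc ++ iq.flatMap (fun row => row.map (fun v => |v|)) := by
  induction iq generalizing acc with
  | nil => simp
  | cons r t ih =>
      rw [List.foldl_cons, pv_inner, ih]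
      simp

lemma pv_ofList_length (l : List Int) :
    (PySem.Set.ofList l).length = l.toFinset.card := by
  have hnd := PySem.Set.nodup_ofList (xs := l)
  have hmem : (PySem.Set.ofList l).toFinset = l.toFinset := by
    ext x; simp [PySem.Set.mem_ofList]
  calc (PySem.Set.ofList l).length = (PySem.Set.ofList l).toFinset.card :=
        (List.toFinset_card_of_nodup hnd).symm
    _ = l.toFinset.card := by rw [hmem]

-- on a ≤-sorted nonempty list, 1 + the scan count is the number of distinct elements
lemma pv_scan (t : List Int) : ∀ x : Int, (x :: t).Pairwise (· ≤ ·) →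
    1 + pvCountChanges x t = ((x :: t).toFinset.card : Int) := by
  induction t with
  | nil => intro x _; simp [pvCountChanges]
  | cons y t' ih =>
      intro x hp
      have hxy : x ≤ y := (List.pairwise_cons.1 hp).1 y (by simp)
      have hp' : (y :: t').Pairwise (· ≤ ·) := (List.pairwise_cons.1 hp).2
      have ihy := ih y hp'
      by_cases hxe : x = y
      · subst hxe
        have : (x :: x :: t').toFinset = (x :: t').toFinset := by
          ext z; simp
        rw [this, ← ihy]
        simp [pvCountChanges]
      · have hnot : x ∉ (y :: t') := by
          intro hmem
          rcases List.mem_cons.1 hmem with h | h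
          · exact hxe h
          · have hyz : y ≤ x := List.rel_of_pairwise_cons hp' h
            exact hxe (le_antisymm hxy hyz)
        have hcard : (x :: y :: t').toFinset.card = (y :: t').toFinset.card + 1 := by
          simp only [List.toFinset_cons]
          rw [Finset.card_insert_of_notMem (by simpa using hnot)]
        rw [hcard]
        have hyx : y ≠ x := fun h => hxe h.symm
        simp only [pvCountChanges, if_pos hyx]
        push_cast
        omega

-- B's sorted scan computes the number of distinct elements of its input list
lemma pv_alt_scan (l : List Int) :
    (match PySem.List.sorted l (fun x => x) false with
     | [] => (0 : Int)
     | x :: t => 1 + pvCountChanges x t) = (l.toFinset.card : Int) := by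
  cases hm : PySem.List.sorted l (fun x => x) false with
  | nil =>
      have : l = [] := (PySem.List.sorted_eq_nil_iff l (fun x => x) false).1 hm
      simp [this]
  | cons x t =>
      have hperm := PySem.List.sorted_perm l (fun x => x) false
      rw [hm] at hperm
      have hpw : (x :: t).Pairwise (· ≤ ·) := by
        have := PySem.List.sorted_pairwise (xs := l) (key := fun x : Int => x) 
        rw [hm] at this
        simpa using this
      show 1 + pvCountChanges x t = (l.toFinset.card : Int)
      rw [pv_scan t x hpw, List.toFinset_eq_of_perm _ _ hperm]

-- ===== VERDICT (by name: the statement is the Claim_ definition above) =====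
theorem getNumOfVars_spec : Claim_equal_getNumOfVars := by
  intro iq _
  unfold Spec_getNumOfVars getNumOfVars getNumOfVars_alt
  rw [pv_outer]
  simp only [List.nil_append]
  rw [pv_ofList_length]
  exact_mod_cast (pv_alt_scan (iq.flatMap (fun row => row.map (fun v => |v|)))).symm
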